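-- pv_equiv track=rewrite | github.com/kauana/tibia-cli | utilities.py | parseCharacter
-- ===== SOURCE A (Python) =====
-- def parseCharacter(charName):
--     index = 0
--     while index < len(charName):
--         if charName[index] == " ":
--              charName = charName.replace(charName[index], "+")
--         index = index + 1
--     charURL = "https://secure.tibia.com/community/?subtopic=characters&name=" + charName
--     return charURL
-- ===== SOURCE B (Python) =====
-- def parseCharacter(charName):
--     return "https://secure.tibia.com/community/?subtopic=characters&name=" + "+".join(charName.split(" "))
-- ===== Notes on version B (the rewrite author's own statement) =====
-- stated objective: faster
-- what changed: Replaced the index-while loop that re-scans and re-replaces the whole string at each space with a single tokenize-then-join of the name, prepended by the fixed URL.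
import Mathlib
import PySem

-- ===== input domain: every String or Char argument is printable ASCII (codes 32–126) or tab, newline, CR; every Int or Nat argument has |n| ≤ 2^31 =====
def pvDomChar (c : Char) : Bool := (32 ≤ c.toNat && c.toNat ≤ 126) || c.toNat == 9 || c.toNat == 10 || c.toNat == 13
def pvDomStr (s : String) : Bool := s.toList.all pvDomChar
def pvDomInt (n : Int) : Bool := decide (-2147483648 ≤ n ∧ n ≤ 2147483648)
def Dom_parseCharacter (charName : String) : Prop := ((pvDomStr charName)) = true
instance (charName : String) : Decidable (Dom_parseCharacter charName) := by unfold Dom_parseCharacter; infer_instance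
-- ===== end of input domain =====

-- B replaces A's index-while loop (re-scanning and str.replace-ing the whole string at each space)
-- with the idiomatic tokenize-then-join: '+'.join(charName.split(' ')).

-- ===== PORT A =====
-- A's while loop. fuel = the string's initial length: str.replace(" ", "+") keeps the length,
-- and index increases by 1 each iteration, so the loop runs at most that many times.
def parseCharacterLoop (fuel : Nat) (s : List Char) (index : Nat) : List Char :=
  match fuel with
  | 0 => s
  | fuel + 1 =>
    if h : index < s.length then
      parseCharacterLoop fuel
        (if s[index] = ' ' then PySem.Chars.replace s [' '] ['+'] else s)
        (index + 1)
    else s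

def parseCharacter (charName : String) : String :=
  String.ofList
    ("https://secure.tibia.com/community/?subtopic=characters&name=".toList
      ++ parseCharacterLoop charName.toList.length charName.toList 0)

-- ===== PORT B =====
-- "+".join(charName.split(" ")); split? is some, since the separator " " is non-empty
def parseCharacter_alt (charName : String) : String :=
  String.ofList
    ("https://secure.tibia.com/community/?subtopic=characters&name=".toList
      ++ PySem.Chars.join ['+'] ((PySem.Chars.split? charName.toList [' ']).getD []))

-- ===== PRECONDITION & SPEC =====
def Spec_parseCharacter (charName : String) (out : String) : Prop := out = parseCharacter_alt charName
instance (charName : String) (out : String) : Decidable (Spec_parseCharacter charName out) := by unfold Spec_parseCharacter; infer_instance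

-- ===== CLAIM (what is proved, stated in full; the proofs are below) =====
def Claim_equal_parseCharacter : Prop := ∀ (charName : String), Dom_parseCharacter charName → Spec_parseCharacter charName (parseCharacter charName)

-- ===== LEMMAS AND PROOFS =====

-- replacing each space by '+', pointwise
def pvSub (c : Char) : Char := if c = ' ' then '+' else c

theorem pvSub_ne_space (c : Char) : (pvSub c == ' ') = false := by
  unfold pvSub; split_ifs <;> simp_all

theorem replace_go_space (fuel : Nat) (l acc : List Char) (h : l.length ≤ fuel) :
    PySem.Chars.replace.go [' '] ['+'] fuel l acc = acc.reverse ++ l.map pvSub := by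
  induction fuel generalizing l acc with
  | zero =>
    have : l = [] := List.length_eq_zero_iff.mp (Nat.le_zero.mp h)
    subst this; simp [PySem.Chars.replace.go]
  | succ fuel ih =>
    cases l with
    | nil => simp [PySem.Chars.replace.go]
    | cons c t =>
      simp only [PySem.Chars.replace.go, List.isPrefixOf]
      by_cases hc : c = ' '
      · subst hc
        simp only [beq_self_eq_true, Bool.true_and, if_true]
        rw [ih _ _ (by simpa using Nat.lt_succ_iff.mp (by simpa using h))]
        simp [pvSub]
      · have hb : (' ' == c) = false := beq_eq_false_iff_ne.mpr (fun h' : ' ' = c => hc h'.symm)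
        simp only [hb, Bool.false_and, Bool.false_eq_true, if_false]
        rw [ih _ _ (by simpa using Nat.lt_succ_iff.mp (by simpa using h))]
        simp [pvSub, hc]

theorem replace_space (s : List Char) :
    PySem.Chars.replace s [' '] ['+'] = s.map pvSub := by
  simpa using replace_go_space s.length s []

theorem intercalate_cons_cons (sep a b : List Char) (xs : List (List Char)) :
    List.intercalate sep (a :: b :: xs) = a ++ sep ++ List.intercalate sep (b :: xs) := by
  simp [List.intercalate, List.intersperse]

theorem intercalate_snoc_append (sep : List Char) (xs : List (List Char)) (y z : List Char) :
    List.intercalate sep (xs ++ [y ++ z]) = List.intercalate sep (xs ++ [y]) ++ z := by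
  induction xs with
  | nil => simp [List.intercalate]
  | cons a xs ih =>
    cases xs with
    | nil => simp [List.intercalate, List.append_assoc]
    | cons b xs =>
      simp only [List.cons_append] at ih ⊢
      rw [intercalate_cons_cons, intercalate_cons_cons, ih]
      simp [List.append_assoc]

theorem intercalate_snoc_nil (xs : List (List Char)) (h : xs ≠ []) :
    List.intercalate ['+'] (xs ++ [[]]) = List.intercalate ['+'] xs ++ ['+'] := by
  induction xs with
  | nil => exact absurd rfl h
  | cons a xs ih =>
    cases xs with
    | nil => simp [List.intercalate]
    | cons b xs =>
      have ih' := ih (by simp)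
      simp only [List.cons_append] at ih' ⊢
      rw [intercalate_cons_cons, intercalate_cons_cons, ih']
      simp [List.append_assoc]

theorem splitOn_go_space (fuel : Nat) (l cur : List Char) (acc : List (List Char))
    (h : l.length ≤ fuel) :
    List.intercalate ['+'] (PySem.Chars.splitOn.go [' '] fuel l cur acc)
      = List.intercalate ['+'] ((cur.reverse :: acc).reverse) ++ l.map pvSub := by
  induction fuel generalizing l cur acc with
  | zero =>
    have : l = [] := List.length_eq_zero_iff.mp (Nat.le_zero.mp h)
    subst this; simp [PySem.Chars.splitOn.go]
  | succ fuel ih =>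
    cases l with
    | nil => simp [PySem.Chars.splitOn.go]
    | cons c t =>
      simp only [PySem.Chars.splitOn.go, List.isPrefixOf]
      by_cases hc : c = ' '
      · subst hc
        simp only [beq_self_eq_true, Bool.true_and, if_true]
        rw [ih _ _ _ (by simpa using Nat.lt_succ_iff.mp (by simpa using h))]
        rw [show (([] : List Char).reverse :: cur.reverse :: acc).reverse
              = (cur.reverse :: acc).reverse ++ [[]] from by simp]
        rw [intercalate_snoc_nil _ (by simp)]
        simp [pvSub, List.append_assoc]
      · have hb : (' ' == c) = false := beq_eq_false_iff_ne.mpr (fun h' : ' ' = c => hc h'.symm)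
        simp only [hb, Bool.false_and, Bool.false_eq_true, if_false]
        rw [ih _ _ _ (by simpa using Nat.lt_succ_iff.mp (by simpa using h))]
        rw [show (((c :: cur).reverse :: acc).reverse : List (List Char))
              = acc.reverse ++ [cur.reverse ++ [c]] by simp]
        rw [intercalate_snoc_append]
        simp [pvSub, hc, List.append_assoc]

theorem join_splitOn_space (s : List Char) :
    PySem.Chars.join ['+'] (PySem.Chars.splitOn s [' ']) = s.map pvSub := by
  unfold PySem.Chars.join PySem.Chars.splitOn
  rw [splitOn_go_space (s.length + 1) s [] [] (Nat.le_succ _)]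
  simp [List.intercalate]

theorem loopA_eq (fuel : Nat) (s : List Char) (index : Nat) (h : s.length ≤ index + fuel) :
    parseCharacterLoop fuel s index
      = if (s.drop index).any (· == ' ') then s.map pvSub else s := by
  induction fuel generalizing s index with
  | zero =>
    have : s.drop index = [] := List.drop_eq_nil_of_le (by omega)
    simp [parseCharacterLoop, this]
  | succ fuel ih =>
    by_cases hlt : index < s.length
    · have hdrop : s.drop index = s[index] :: s.drop (index + 1) :=
        List.drop_eq_getElem_cons hlt
      simp only [parseCharacterLoop, dif_pos hlt]
      by_cases hc : s[index] = ' '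
      · rw [if_pos hc, replace_space]
        rw [ih (s.map pvSub) (index + 1) (by simpa using by omega)]
        have hno : ((s.map pvSub).drop (index + 1)).any (· == ' ') = false := by
          rw [← List.map_drop, List.any_map]
          simp only [List.any_eq_false]
          intro x _; simpa using pvSub_ne_space x
        rw [hno]
        simp [hdrop, hc]
      · rw [if_neg hc]
        rw [ih s (index + 1) (by omega)]
        have : (s.drop index).any (· == ' ') = (s.drop (index + 1)).any (· == ' ') := by
          rw [hdrop, List.any_cons, beq_eq_false_iff_ne.mpr hc, Bool.false_or]
        rw [this]
    · have : s.drop index = [] := List.drop_eq_nil_of_le (by omega)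
      simp [parseCharacterLoop, hlt, this]

theorem map_pvSub_of_no_space (s : List Char) (h : s.any (· == ' ') = false) :
    s.map pvSub = s := by
  induction s with
  | nil => rfl
  | cons a t ih =>
    rw [List.any_cons, Bool.or_eq_false_iff] at h
    simp [pvSub, beq_eq_false_iff_ne.mp h.1, ih h.2]

-- ===== VERDICT (by name: the statement is the Claim_ definition above) =====
theorem parseCharacter_spec : Claim_equal_parseCharacter := by
  intro charName _
  unfold Spec_parseCharacter parseCharacter parseCharacter_alt
  congr 1
  rw [loopA_eq charName.toList.length charName.toList 0 (by omega)]
  simp only [PySem.Chars.split?, List.isEmpty_cons, Option.getD_some, if_false, Bool.false_eq_true]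
  rw [join_splitOn_space]
  split_ifs with hsp
  · rfl
  · congr 1
    exact (map_pvSub_of_no_space _ (Bool.eq_false_iff.mpr hsp)).symm
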